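-- pv_equiv track=rewrite | github.com/LambdaXIII/cx-studio-tk | packages/cxalio-studio-tools/ffpretty/single_transcoder.py | _get_input_files
-- ===== SOURCE A (Python) =====
-- from collections.abc import Iterable
--
-- def _get_input_files(arguments: Iterable[str]) -> list[str]:
--     """从参数中提取输入文件列表"""
--     input_files = []
--     input_marked = False
--     for a in arguments:
--         if a == "-i":
--             input_marked = True
--         elif input_marked:
--             input_files.append(a)
--             input_marked = False
--     return input_files
-- ===== SOURCE B (Python) =====
-- def _get_input_files(arguments):
--     args = list(arguments)
--     return [cur for prev, cur in zip(args, args[1:]) if prev == "-i" and cur != "-i"]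
-- ===== Notes on version B (the rewrite author's own statement) =====
-- stated objective: simpler
-- what changed: Replaced the stateful input_marked flag loop with a stateless pairwise comprehension over zip(args, args[1:]) selecting tokens that follow '-i' and are not themselves '-i'.
import Mathlib
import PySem

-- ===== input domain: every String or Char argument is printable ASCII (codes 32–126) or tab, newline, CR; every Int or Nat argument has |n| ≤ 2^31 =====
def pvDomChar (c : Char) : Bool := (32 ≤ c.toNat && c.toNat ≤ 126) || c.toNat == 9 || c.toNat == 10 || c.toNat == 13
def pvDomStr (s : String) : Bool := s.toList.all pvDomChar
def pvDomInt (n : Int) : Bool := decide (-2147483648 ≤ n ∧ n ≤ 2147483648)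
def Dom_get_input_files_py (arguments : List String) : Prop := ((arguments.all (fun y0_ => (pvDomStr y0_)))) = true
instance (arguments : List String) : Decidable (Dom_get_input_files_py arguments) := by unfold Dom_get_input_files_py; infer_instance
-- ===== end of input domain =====

-- B replaces A's stateful input_marked flag with a stateless pairwise scan over adjacent pairs (objective: simpler).

-- ===== PORT A =====
-- A's loop carries state (input_files, input_marked); ported as a foldl over that pair.
def get_input_files_py (arguments : List String) : List String :=
  (arguments.foldl
    (fun (st : List String × Bool) a =>
      if a = "-i" then (st.1, true)
      else if st.2 then (st.1 ++ [a], false)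
      else (st.1, st.2)) ([], false)).1

-- ===== PORT B =====
def get_input_files_py_alt (arguments : List String) : List String :=
  (arguments.zip arguments.tail).filterMap
    (fun p => if p.1 = "-i" ∧ p.2 ≠ "-i" then some p.2 else none)

-- ===== PRECONDITION & SPEC =====
def Spec_get_input_files_py (arguments : List String) (out : List String) : Prop := out = get_input_files_py_alt arguments
instance (arguments : List String) (out : List String) : Decidable (Spec_get_input_files_py arguments out) := by unfold Spec_get_input_files_py; infer_instance

-- ===== CLAIM (what is proved, stated in full; the proofs are below) =====
def Claim_equal_get_input_files_py : Prop := ∀ (arguments : List String), Dom_get_input_files_py arguments → Spec_get_input_files_py arguments (get_input_files_py arguments)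

-- ===== LEMMAS AND PROOFS =====

-- Common characterisation of both loops: what still gets emitted from `xs` given whether the previous token was "-i".
def pvEmit (marked : Bool) : List String → List String
  | [] => []
  | a :: rest => (if marked ∧ a ≠ "-i" then [a] else []) ++ pvEmit (a = "-i") rest

theorem pvFoldA (xs : List String) (acc : List String) (marked : Bool) :
    (xs.foldl
      (fun (st : List String × Bool) a =>
        if a = "-i" then (st.1, true)
        else if st.2 then (st.1 ++ [a], false)
        else (st.1, st.2)) (acc, marked)).1 = acc ++ pvEmit marked xs := by
  induction xs generalizing acc marked with
  | nil => simp [pvEmit]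
  | cons a rest ih =>
    simp only [List.foldl_cons, pvEmit]
    by_cases ha : a = "-i"
    · simp [ha, ih]
    · cases marked <;> simp [ha, ih]

theorem pvZipB (a : String) (rest : List String) :
    ((a :: rest).zip rest).filterMap
      (fun p => if p.1 = "-i" ∧ p.2 ≠ "-i" then some p.2 else none)
      = pvEmit (a = "-i") rest := by
  induction rest generalizing a with
  | nil => simp [pvEmit]
  | cons b rs ih =>
    simp only [List.zip_cons_cons, List.filterMap_cons, pvEmit]
    by_cases hb : b = "-i"
    · simp [hb, ih]
    · by_cases ha : a = "-i" <;> simp [ha, hb, ih]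

-- ===== VERDICT (by name: the statement is the Claim_ definition above) =====
theorem get_input_files_py_spec : Claim_equal_get_input_files_py := by
  intro arguments _
  unfold Spec_get_input_files_py get_input_files_py get_input_files_py_alt
  cases arguments with
  | nil => simp
  | cons a rest =>
    rw [pvFoldA]
    simpa [pvEmit] using (pvZipB a rest).symm
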